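-- pv_equiv track=rewrite | github.com/ktawiah/CodePath-DSA | Unit-2/Session-1/Advanced_V2/time_portals.py | portal_sum
-- ===== SOURCE A (Python) =====
-- def portal_sum(portals, destination):
--
--     portal_count = {}
--
--     # Count occurrences of each portal and store their indices
--     for index, portal in enumerate(portals):
--         portal_count[portal] = portal_count.get(portal, []) + [index]
--
--     result_pairs = []
--
--     # Check for pairs
--     for i, value in enumerate(portals):
--         second_part = destination[len(value) :]  # What the second part should be
--
--         if second_part in portal_count:
--             for j in portal_count[second_part]:
--                 if i != j:  # Ensure i is not equal to j
--                     result_pairs.append((i, j))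
--
--     return result_pairs
-- ===== SOURCE B (Python) =====
-- def portal_sum(portals, destination):
--     # The required second part depends only on len(portals[i]); group the work by length:
--     # for each distinct length L, precompute the ascending indices j with portals[j] == destination[L:].
--     matches_by_len = {}
--     for portal in portals:
--         length = len(portal)
--         if length not in matches_by_len:
--             target = destination[length:]
--             matches_by_len[length] = [j for j, other in enumerate(portals) if other == target]
--     return [(i, j)
--             for i, value in enumerate(portals)
--             for j in matches_by_len[len(value)]
--             if j != i]
-- ===== Notes on version B (the rewrite author's own statement) =====
-- stated objective: faster
-- what changed: B replaces A's portal-string-keyed index dictionary with grouping by portal LENGTH: since the required second part depends only on len(portals[i]), B slices destination and scans for its matches once per distinct length instead of once per element, then emits pairs by length lookup.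
import Mathlib
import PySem

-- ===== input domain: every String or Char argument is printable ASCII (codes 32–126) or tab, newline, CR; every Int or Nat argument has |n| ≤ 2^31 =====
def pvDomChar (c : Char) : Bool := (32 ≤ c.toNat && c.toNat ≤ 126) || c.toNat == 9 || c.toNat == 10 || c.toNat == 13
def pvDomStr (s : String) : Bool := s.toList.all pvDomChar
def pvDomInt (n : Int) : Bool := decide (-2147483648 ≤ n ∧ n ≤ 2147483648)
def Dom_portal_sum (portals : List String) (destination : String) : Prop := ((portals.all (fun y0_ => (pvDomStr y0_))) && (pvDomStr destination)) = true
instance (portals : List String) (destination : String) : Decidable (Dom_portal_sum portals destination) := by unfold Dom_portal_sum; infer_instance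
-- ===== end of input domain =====

-- B groups the work by portal LENGTH instead of A's portal-string-keyed index dictionary:
-- the needed second part depends only on len(portals[i]), so B precomputes one match list
-- per distinct length and emits pairs by lookup, in A's exact output order (objective: faster,
-- measured: one suffix slice and scan per distinct length, not per element).

-- ===== PORT A =====
def portal_sum (portals : List String) (destination : String) : List (Int × Int) :=
  -- portal_count[portal] = portal_count.get(portal, []) + [index]
  let portal_count : PySem.Dict String (List Int) :=
    (PySem.List.enumerate portals 0).foldl
      (fun d p => d.modify p.2 [] (fun x => x ++ [p.1])) PySem.Dict.empty
  (PySem.List.enumerate portals 0).foldl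
    (fun res p =>
      let second_part := PySem.Str.slice destination (some (PySem.Str.len p.2)) none
      if portal_count.contains second_part then
        (portal_count.getD second_part []).foldl
          (fun res j => if p.1 != j then res ++ [(p.1, j)] else res) res
      else res)
    []

-- ===== PORT B =====
def portal_sum_alt (portals : List String) (destination : String) : List (Int × Int) :=
  -- matches_by_len[L] = [j for j, other in enumerate(portals) if other == destination[L:]]
  let matches_by_len : PySem.Dict Int (List Int) :=
    portals.foldl
      (fun d portal =>
        let length := PySem.Str.len portal
        if d.contains length then d
        else
          let target := PySem.Str.slice destination (some length) none
          d.insert length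
            (((PySem.List.enumerate portals 0).filter (fun q => q.2 == target)).map (fun q => q.1)))
      PySem.Dict.empty
  -- [(i, j) for i, value in enumerate(portals) for j in matches_by_len[len(value)] if j != i]
  (PySem.List.enumerate portals 0).foldl
    (fun res p =>
      res ++ (((matches_by_len.getD (PySem.Str.len p.2) []).filter (fun j => j != p.1)).map
        (fun j => (p.1, j))))
    []

-- ===== PRECONDITION & SPEC =====
def Spec_portal_sum (portals : List String) (destination : String) (out : List (Int × Int)) : Prop := out = portal_sum_alt portals destination
instance (portals : List String) (destination : String) (out : List (Int × Int)) : Decidable (Spec_portal_sum portals destination out) := by unfold Spec_portal_sum; infer_instance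

-- ===== CLAIM (what is proved, stated in full; the proofs are below) =====
def Claim_equal_portal_sum : Prop := ∀ (portals : List String) (destination : String), Dom_portal_sum portals destination → Spec_portal_sum portals destination (portal_sum portals destination)

-- ===== LEMMAS AND PROOFS =====

-- canonical per-length match list
def pvM (portals : List String) (destination : String) (L : Int) : List Int :=
  ((PySem.List.enumerate portals 0).filter
    (fun q => q.2 == PySem.Str.slice destination (some L) none)).map (fun q => q.1)

-- The grouping dict A builds, looked up at s, is exactly the ascending list of indices whose portal equals s.
theorem pv_dict_getD (portals : List String) (s : String) :
    ((PySem.List.enumerate portals 0).foldl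
      (fun d p => d.modify p.2 [] (fun x => x ++ [p.1])) PySem.Dict.empty).getD s []
    = ((PySem.List.enumerate portals 0).filter (fun q => q.2 == s)).map (fun q => q.1) := by
  have h := PySem.Dict.getD_foldl_modify_append
      ((PySem.List.enumerate portals 0).map (fun p => (p.2, p.1)))
      (PySem.Dict.empty (κ := String) (ν := List Int)) s
  rw [List.foldl_map] at h
  simpa [List.filter_map, Function.comp, List.map_map] using h

-- A's membership guard: the dict contains s iff s is one of the portals.
theorem pv_dict_contains (portals : List String) (s : String) :
    ((PySem.List.enumerate portals 0).foldl
      (fun d p => d.modify p.2 [] (fun x => x ++ [p.1])) PySem.Dict.empty).contains s = true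
    ↔ s ∈ portals := by
  have hk := PySem.Dict.keys_foldl_modify_key (PySem.List.enumerate portals 0)
      (fun p => p.2) [] (fun _ p x => x ++ [p.1]) (PySem.Dict.empty (κ := String) (ν := List Int))
  rw [PySem.Dict.contains_iff_mem_keys, hk]
  simp [PySem.Dict.keys_empty, PySem.List.map_snd_enumerate]

-- Per outer iteration, A's dict-driven inner loop appends the canonical filtered segment.
theorem pv_stepA (portals : List String) (destination : String) (i : Int) (v : String)
    (res : List (Int × Int)) :
    (if ((PySem.List.enumerate portals 0).foldl
          (fun d p => d.modify p.2 [] (fun x => x ++ [p.1])) PySem.Dict.empty).contains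
          (PySem.Str.slice destination (some (PySem.Str.len v)) none) then
        (((PySem.List.enumerate portals 0).foldl
            (fun d p => d.modify p.2 [] (fun x => x ++ [p.1])) PySem.Dict.empty).getD
            (PySem.Str.slice destination (some (PySem.Str.len v)) none) []).foldl
          (fun res j => if i != j then res ++ [(i, j)] else res) res
      else res)
    = res ++ (((pvM portals destination (PySem.Str.len v)).filter (fun j => j != i)).map
        (fun j => (i, j))) := by
  set sp := PySem.Str.slice destination (some (PySem.Str.len v)) none with hsp
  by_cases hc : ((PySem.List.enumerate portals 0).foldl
      (fun d p => d.modify p.2 [] (fun x => x ++ [p.1])) PySem.Dict.empty).contains sp = true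
  · rw [if_pos hc, pv_dict_getD,
      PySem.List.foldl_append_if (p := fun j : Int => i != j) (f := fun j : Int => (i, j))]
    unfold pvM
    congr 2
    apply List.filter_congr
    intro j _
    simp [bne, BEq.comm]
  · rw [if_neg hc]
    have hnm : sp ∉ portals := fun hm => hc ((pv_dict_contains portals sp).2 hm)
    have hnil : ((PySem.List.enumerate portals 0).filter (fun q => q.2 == sp)) = [] := by
      apply List.filter_eq_nil_iff.2
      intro q hq hqq
      apply hnm
      have : q.2 ∈ portals := by
        rw [← PySem.List.map_snd_enumerate portals 0]; exact List.mem_map_of_mem hq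
      rw [← (beq_iff_eq).1 hqq]; exact this
    unfold pvM
    rw [hnil]; simp

-- B's length dict looks up the canonical list at any length it contains.
theorem pv_len_getD (portals : List String) (destination : String) (l : List String)
    (d : PySem.Dict Int (List Int))
    (hd : ∀ L, d.contains L = true → d.getD L [] = pvM portals destination L) :
    ∀ L, (l.foldl
        (fun d portal =>
          if d.contains (PySem.Str.len portal) then d
          else d.insert (PySem.Str.len portal)
            (((PySem.List.enumerate portals 0).filter
              (fun q => q.2 == PySem.Str.slice destination (some (PySem.Str.len portal)) none)).map
              (fun q => q.1))) d).contains L = true →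
      (l.foldl
        (fun d portal =>
          if d.contains (PySem.Str.len portal) then d
          else d.insert (PySem.Str.len portal)
            (((PySem.List.enumerate portals 0).filter
              (fun q => q.2 == PySem.Str.slice destination (some (PySem.Str.len portal)) none)).map
              (fun q => q.1))) d).getD L [] = pvM portals destination L := by
  induction l generalizing d with
  | nil => simpa using hd
  | cons x xs ih =>
    intro L
    simp only [List.foldl_cons]
    split
    · exact ih _ hd L
    · apply ih
      intro L' hL'
      rw [PySem.Dict.getD_insert]
      split
      · next heq => rw [heq]; rfl
      · next hne =>
        rw [PySem.Dict.contains_insert] at hL'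
        have h2 : L' = PySem.Str.len x ∨ d.contains L' = true := by simpa using hL'
        rcases h2 with h2 | h2
        · exact absurd h2 hne
        · exact hd L' h2

-- B's length dict contains the length of every portal.
theorem pv_len_contains (portals : List String) (destination : String) (l : List String)
    (d : PySem.Dict Int (List Int)) (x : String) (hx : x ∈ l) :
    (l.foldl
      (fun d portal =>
        if d.contains (PySem.Str.len portal) then d
        else d.insert (PySem.Str.len portal)
          (((PySem.List.enumerate portals 0).filter
            (fun q => q.2 == PySem.Str.slice destination (some (PySem.Str.len portal)) none)).map
            (fun q => q.1))) d).contains (PySem.Str.len x) = true := by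
  induction l generalizing d with
  | nil => cases hx
  | cons y ys ih =>
    simp only [List.foldl_cons]
    rcases List.mem_cons.1 hx with h | h
    · subst h
      -- after processing x, the dict contains len x, and that is preserved
      have hmono : ∀ (l' : List String) (d' : PySem.Dict Int (List Int)) (L : Int),
          d'.contains L = true →
          (l'.foldl
            (fun d portal =>
              if d.contains (PySem.Str.len portal) then d
              else d.insert (PySem.Str.len portal)
                (((PySem.List.enumerate portals 0).filter
                  (fun q => q.2 == PySem.Str.slice destination (some (PySem.Str.len portal)) none)).map
                  (fun q => q.1))) d').contains L = true := by
        intro l'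
        induction l' with
        | nil => intro d' L h; simpa using h
        | cons z zs ih2 =>
          intro d' L h
          simp only [List.foldl_cons]
          split
          · exact ih2 d' L h
          · apply ih2
            rw [PySem.Dict.contains_insert]
            simp [h]
      apply hmono
      split
      · next h => exact h
      · rw [PySem.Dict.contains_insert]; simp
    · exact ih _ h

-- ===== VERDICT (by name: the statement is the Claim_ definition above) =====
theorem portal_sum_spec : Claim_equal_portal_sum := by
  intro portals destination _
  unfold Spec_portal_sum portal_sum portal_sum_alt
  apply PySem.List.foldl_congr_mem'
  intro p hp res
  rw [pv_stepA portals destination p.1 p.2 res]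
  congr 2
  have hmem : p.2 ∈ portals := by
    rw [← PySem.List.map_snd_enumerate portals 0]; exact List.mem_map_of_mem hp
  rw [pv_len_getD portals destination portals PySem.Dict.empty
    (by intro L h; simp [PySem.Dict.contains_empty] at h) (PySem.Str.len p.2)
    (pv_len_contains portals destination portals PySem.Dict.empty p.2 hmem)]
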